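-- pv_equiv track=rewrite | github.com/frkor25/diskret | Logic/truthtable.py | space_format
-- ===== SOURCE A (Python) =====
-- def space_format(expression: str) -> str:
--     """Spaces parts of an expression appropiately"""
--     spaced_expression = ""
--     for char in expression:
--         if char == "(":
--             spaced_expression += char + " "
--         elif char == "-":
--             spaced_expression += "not" + " "
--         elif char == ")":
--             spaced_expression += " " + char
--         else:
--             spaced_expression += char
--     return spaced_expression
-- ===== SOURCE B (Python) =====
-- def space_format(expression: str) -> str:
--     """Spaces parts of an expression appropiately"""
--     rep = {"(": "( ", "-": "not ", ")": " )"}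
--     parts = []
--     start = 0
--     while True:
--         hits = [j for c in rep if (j := expression.find(c, start)) != -1]
--         if not hits:
--             parts.append(expression[start:])
--             return "".join(parts)
--         i = min(hits)
--         parts.append(expression[start:i])
--         parts.append(rep[expression[i]])
--         start = i + 1
-- ===== Notes on version B (the rewrite author's own statement) =====
-- stated objective: faster
-- what changed: Replaces A's per-character branch-and-accumulate loop with a segment-copying scan: str.find jumps to the next special character, whole untouched slices are copied into a parts list, and a single join assembles the result, moving the character work into C-level primitives.
import Mathlib
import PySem

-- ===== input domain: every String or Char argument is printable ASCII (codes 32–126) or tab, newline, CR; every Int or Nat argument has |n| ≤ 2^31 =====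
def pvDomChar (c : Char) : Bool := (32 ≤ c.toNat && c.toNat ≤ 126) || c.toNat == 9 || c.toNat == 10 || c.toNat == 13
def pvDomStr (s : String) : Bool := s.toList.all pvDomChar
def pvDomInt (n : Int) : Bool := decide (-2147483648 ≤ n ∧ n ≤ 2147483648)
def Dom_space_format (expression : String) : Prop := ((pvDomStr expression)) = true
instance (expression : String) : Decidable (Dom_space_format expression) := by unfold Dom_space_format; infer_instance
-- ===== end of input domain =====

-- B replaces A's per-character branch-and-accumulate loop with a segment-copying scan: it jumps to the next
-- special character with str.find, copies whole untouched slices, and joins the parts at the end (alternative decomposition).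


-- ===== PORT A =====
-- Python strings are ported as their code-point lists; '+=' on the accumulator is list append.
def space_format (expression : String) : String :=
  String.ofList (expression.toList.foldl (fun acc c =>
    if c = '(' then acc ++ [c] ++ [' ']
    else if c = '-' then acc ++ "not".toList ++ [' ']
    else if c = ')' then acc ++ [' '] ++ [c]
    else acc ++ [c]) [])

-- ===== PORT B =====
-- rep = {"(": "( ", "-": "not ", ")": " )"}
def sfRep : PySem.Dict Char (List Char) :=
  PySem.Dict.mk [('(', ['(', ' ']), ('-', ['n', 'o', 't', ' ']), (')', [' ', ')'])]

-- the list comprehension building 'hits': one find per key of rep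
def sfHits (s : List Char) (start : Nat) : List Int :=
  (PySem.Dict.keys sfRep).filterMap (fun c =>
    let j := PySem.Chars.findFrom s [c] (start : Int)
    if j ≠ -1 then some j else none)

-- the while-loop of Source B; fuel only bounds the number of iterations (each iteration moves 'start' past the
-- hit it found, so expression-length + 1 iterations always suffice) — it never alters the computed value.
def sfGo (s : List Char) : Nat → List (List Char) → Nat → List Char
  | 0, parts, start => PySem.Chars.join [] (parts ++ [PySem.List.slice s (some (start : Int)) none])
  | fuel + 1, parts, start =>
    match PySem.List.min? (sfHits s start) (fun j => j) with
    | none => PySem.Chars.join [] (parts ++ [PySem.List.slice s (some (start : Int)) none])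
    | some i =>
      match PySem.List.pyGet? s i with
      | none => []   -- unreachable: find returned a valid index into s
      | some ch =>
        sfGo s fuel
          (parts ++ [PySem.List.slice s (some (start : Int)) (some i),
                     (PySem.Dict.get? sfRep ch).getD []])   -- rep[expression[i]]: the key is always present
          (i.toNat + 1)

def space_format_alt (expression : String) : String :=
  String.ofList (sfGo expression.toList (expression.toList.length + 1) [] 0)

-- ===== PRECONDITION & SPEC =====
def Spec_space_format (expression : String) (out : String) : Prop := out = space_format_alt expression
instance (expression : String) (out : String) : Decidable (Spec_space_format expression out) := by unfold Spec_space_format; infer_instance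

-- ===== CLAIM (what is proved, stated in full; the proofs are below) =====
def Claim_equal_space_format : Prop := ∀ (expression : String), Dom_space_format expression → Spec_space_format expression (space_format expression)

-- ===== LEMMAS AND PROOFS =====

-- the per-character mapping both programs realise
def sfMap (c : Char) : List Char :=
  if c = '(' then ['(', ' ']
  else if c = '-' then ['n', 'o', 't', ' ']
  else if c = ')' then [' ', ')']
  else [c]

theorem join_nil_eq_flatten (l : List (List Char)) : PySem.Chars.join [] l = l.flatten := by
  show (List.intersperse [] l).flatten = l.flatten
  induction l with
  | nil => rfl
  | cons x t ih => cases t <;> simp_all [List.intersperse]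

theorem sfMap_of_not_special (c : Char) (h : c ∉ PySem.Dict.keys sfRep) : sfMap c = [c] := by
  have h1 : c ≠ '(' := by intro hc; exact h (by simp [hc, sfRep, PySem.Dict.keys])
  have h2 : c ≠ '-' := by intro hc; exact h (by simp [hc, sfRep, PySem.Dict.keys])
  have h3 : c ≠ ')' := by intro hc; exact h (by simp [hc, sfRep, PySem.Dict.keys])
  simp [sfMap, h1, h2, h3]

-- A's accumulating fold is a flatMap of sfMap
theorem foldA_eq_flatMap : ∀ (l acc : List Char),
    l.foldl (fun acc c =>
      if c = '(' then acc ++ [c] ++ [' ']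
      else if c = '-' then acc ++ "not".toList ++ [' ']
      else if c = ')' then acc ++ [' '] ++ [c]
      else acc ++ [c]) acc
    = acc ++ l.flatMap sfMap := by
  intro l
  induction l with
  | nil => simp
  | cons c t ih =>
    intro acc
    simp only [List.foldl_cons, List.flatMap_cons, ih]
    by_cases h1 : c = '(' <;> by_cases h2 : c = '-' <;> by_cases h3 : c = ')' <;>
      simp_all [sfMap]

theorem mem_sfHits (s : List Char) (start : Nat) (j : Int) :
    j ∈ sfHits s start ↔
      ∃ c ∈ PySem.Dict.keys sfRep, PySem.Chars.findFrom s [c] (start : Int) = j ∧ j ≠ -1 := by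
  simp only [sfHits, List.mem_filterMap]
  constructor
  · rintro ⟨c, hc, hj⟩
    by_cases h : PySem.Chars.findFrom s [c] (start : Int) = -1 <;> simp [h] at hj
    exact ⟨c, hc, hj, fun he => h (hj.trans he)⟩
  · rintro ⟨c, hc, hj, hne⟩
    exact ⟨c, hc, by rw [hj] at *; simp [hne]⟩

theorem flatMap_sfMap_id (l : List Char) (h : ∀ c ∈ l, c ∉ PySem.Dict.keys sfRep) :
    l.flatMap sfMap = l := by
  induction l with
  | nil => rfl
  | cons c t ih =>
    simp only [List.flatMap_cons, sfMap_of_not_special c (h c (List.mem_cons_self)),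
      List.singleton_append, List.cons.injEq, true_and]
    exact ih (fun x hx => h x (List.mem_cons_of_mem _ hx))

-- a special char occurring at position m ≥ start makes its find succeed
theorem find_ne_neg_one_of_getElem (s : List Char) (start m : Nat) (c : Char)
    (hs : start ≤ s.length) (hm : m < s.length) (hsm : start ≤ m) (hc : s[m] = c) :
    PySem.Chars.findFrom s [c] (start : Int) ≠ -1 := by
  intro hcon
  exact (PySem.Chars.findFrom_natCast_eq_neg_one_iff s [c] start hs).mp hcon
    ((List.singleton_infix_iff c _).mpr
    (by rw [← hc]; exact List.mem_iff_getElem.mpr ⟨m - start, by simp only [List.length_drop]; omega,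
        by rw [List.getElem_drop]; congr 1; omega⟩))

-- B's loop computes parts.flatten ++ flatMap sfMap over the unprocessed tail
theorem sfGo_eq (s : List Char) : ∀ (fuel : Nat) (parts : List (List Char)) (start : Nat),
    start ≤ s.length → s.length - start < fuel →
    sfGo s fuel parts start = parts.flatten ++ (s.drop start).flatMap sfMap := by
  intro fuel
  induction fuel with
  | zero => intro _ _ _ h; omega
  | succ fuel ih =>
    intro parts start hs hf
    simp only [sfGo]
    cases hmin : PySem.List.min? (sfHits s start) (fun j => j) with
    | none =>
      -- no hit: no special character at or after start
      have hempty := (PySem.List.min?_eq_none_iff _ _).mp hmin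
      have hnone : ∀ c ∈ (s.drop start), c ∉ PySem.Dict.keys sfRep := by
        intro c hc hk
        obtain ⟨idx, hidx, hgl⟩ := List.mem_iff_getElem.mp hc
        have hlen : idx + start < s.length := by
          have := List.length_drop (l := s) (i := start) ▸ hidx; omega
        have : s[start + idx] = c := by
          rw [List.getElem_drop] at hgl; rw [← hgl]
        have hfind := find_ne_neg_one_of_getElem s start (start + idx) c hs (by omega) (by omega) this
        have : PySem.Chars.findFrom s [c] (start : Int) ∈ sfHits s start :=
          (mem_sfHits s start _).mpr ⟨c, hk, rfl, hfind⟩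
        rw [hempty] at this; simp at this
      rw [join_nil_eq_flatten, List.flatten_append, PySem.List.slice_from_natCast,
        flatMap_sfMap_id _ hnone]
      simp
    | some i =>
      obtain ⟨c0, hc0k, hc0f, hine⟩ := (mem_sfHits s start i).mp (PySem.List.min?_mem hmin)
      have hspec := PySem.Chars.findFrom_natCast_spec s [c0] start hs (hc0f ▸ hine)
      rw [hc0f] at hspec
      obtain ⟨hsi, hpre, hminimal⟩ := hspec
      have hi0 : 0 ≤ i := by omega
      set n := i.toNat with hn
      have hin : i = (n : Int) := by omega
      have hsn : start ≤ n := by omega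
      obtain ⟨t, ht⟩ := hpre
      have hnlen : n < s.length := by
        have := congrArg List.length ht
        simp [List.length_drop] at this; omega
      have hgn : s[n] = c0 := by
        have h2 := congrArg List.head? ht
        simpa [List.head?_drop, List.getElem?_eq_getElem hnlen] using h2.symm
      -- the slice start..n contains no special character
      have hseg : ∀ c ∈ (s.drop start).take (n - start), c ∉ PySem.Dict.keys sfRep := by
        intro c hc hk
        obtain ⟨idx, hidx, hgl⟩ := List.mem_iff_getElem.mp hc
        have hidx' : idx < n - start := lt_of_lt_of_le hidx (by
          simp only [List.length_take]; omega)
        have hglen : start + idx < s.length := by omega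
        have hgc : s[start + idx] = c := by
          rw [List.getElem_take, List.getElem_drop] at hgl; rw [← hgl]
        have hfind := find_ne_neg_one_of_getElem s start (start + idx) c hs hglen (by omega) hgc
        have hmem : PySem.Chars.findFrom s [c] (start : Int) ∈ sfHits s start :=
          (mem_sfHits s start _).mpr ⟨c, hk, rfl, hfind⟩
        have hile := PySem.List.min?_isMin hmin _ hmem
        have hspec2 := PySem.Chars.findFrom_natCast_spec s [c] start hs hfind
        have := hspec2.2.2 (start + idx) (by omega) (by omega)
        exact this ⟨s.drop (start + idx + 1), by
          rw [List.drop_eq_getElem_cons hglen, hgc, List.singleton_append]⟩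
      -- s[i] and rep[s[i]]
      have hget : PySem.List.pyGet? s i = some c0 := by
        rw [hin, PySem.List.pyGet?_natCast, List.getElem?_eq_getElem hnlen, hgn]
      dsimp only
      rw [hget]
      dsimp only
      have hrep : (PySem.Dict.get? sfRep c0).getD [] = sfMap c0 := by
        have : c0 = '(' ∨ c0 = '-' ∨ c0 = ')' := by
          simpa [sfRep, PySem.Dict.keys] using hc0k
        rcases this with h | h | h <;> subst h <;> decide
      rw [ih _ (n + 1) (by omega) (by omega)]
      rw [List.flatten_append, hin, PySem.List.slice_natCast]
      have hdropsplit : s.drop start =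
          (s.drop start).take (n - start) ++ c0 :: s.drop (n + 1) := by
        conv_lhs => rw [← List.take_append_drop (n - start) (s.drop start)]
        congr 1
        rw [List.drop_drop]
        have : start + (n - start) = n := by omega
        rw [this, List.drop_eq_getElem_cons hnlen, hgn]
      conv_rhs => rw [hdropsplit]
      rw [List.flatMap_append, flatMap_sfMap_id _ hseg, List.flatMap_cons, hrep]
      simp

-- ===== VERDICT (by name: the statement is the Claim_ definition above) =====
theorem space_format_spec : Claim_equal_space_format := by
  intro expression _
  show space_format expression = space_format_alt expression
  unfold space_format space_format_alt
  rw [foldA_eq_flatMap, sfGo_eq expression.toList (expression.toList.length + 1) [] 0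
      (Nat.zero_le _) (by omega)]
  simp
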